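-- pv_equiv track=rewrite | github.com/butERRORfly/Python_Practicum | 3_2/3_2_17.py | find_second_level_friends
-- ===== SOURCE A (Python) =====
-- def find_second_level_friends(friend_pairs):
--     friends_map = {}
--     for person1, person2 in friend_pairs:
--         friends_map[person1] = friends_map.get(person1, set()) | set([person2])
--         friends_map[person2] = friends_map.get(person2, set()) | set([person1])
--
--     second_level_friends = {}
--     for person in friends_map:
--         direct_friends = friends_map[person]
--         second_level_set = set()
--         for friend in direct_friends:
--             second_level_set.update(friends_map[friend])
--         second_level_set.discard(person)
--         second_level_set.difference_update(direct_friends)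
--         second_level_friends[person] = sorted(second_level_set)
--
--     return second_level_friends
-- ===== SOURCE B (Python) =====
-- def find_second_level_friends(friend_pairs):
--     # Symmetrized edge list instead of a dict of neighbor sets.
--     edges = []
--     for a, b in friend_pairs:
--         edges.append((a, b))
--         edges.append((b, a))
--     people = []
--     for a, _ in edges:
--         if a not in people:
--             people.append(a)
--     result = {}
--     for p in people:
--         nbrs_p = {y for x, y in edges if x == p}
--         second = {y for f in nbrs_p for x, y in edges if x == f}
--         result[p] = sorted(second - nbrs_p - {p})
--     return result
-- ===== Notes on version B (the rewrite author's own statement) =====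
-- stated objective: alternative
-- what changed: Replaces the incrementally-maintained dict of neighbor sets with a flat symmetrized edge list: people are deduped from edge sources, neighbor and second-level sets are rebuilt per person by set comprehensions filtering the edge list, then self and direct friends are subtracted.
import Mathlib
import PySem

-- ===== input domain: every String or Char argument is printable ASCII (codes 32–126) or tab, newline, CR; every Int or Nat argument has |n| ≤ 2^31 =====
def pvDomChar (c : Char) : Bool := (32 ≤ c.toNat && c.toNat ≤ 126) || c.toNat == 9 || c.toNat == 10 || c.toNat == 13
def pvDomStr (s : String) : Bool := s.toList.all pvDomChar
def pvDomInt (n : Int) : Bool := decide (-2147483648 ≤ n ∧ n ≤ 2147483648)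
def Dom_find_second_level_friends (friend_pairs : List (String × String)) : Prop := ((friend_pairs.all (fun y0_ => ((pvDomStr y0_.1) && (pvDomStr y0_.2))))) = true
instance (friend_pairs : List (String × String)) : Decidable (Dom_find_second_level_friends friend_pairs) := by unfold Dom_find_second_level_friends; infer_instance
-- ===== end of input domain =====

-- B replaces A's incrementally-maintained dict of neighbor sets by a flat symmetrized edge
-- list that is deduped for the people list and scanned per person (alternative decomposition,
-- same return value).

-- ===== PORT A =====
-- one iteration of A's first loop: symmetric insertion into the friends map
def fsA_step (d : PySem.Dict String (PySem.Set String)) (pq : String × String) :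
    PySem.Dict String (PySem.Set String) :=
  let d1 := d.insert pq.1 (PySem.Set.union (d.getD pq.1 PySem.Set.empty) (PySem.Set.ofList [pq.2]))
  d1.insert pq.2 (PySem.Set.union (d1.getD pq.2 PySem.Set.empty) (PySem.Set.ofList [pq.1]))

def fsA_map (friend_pairs : List (String × String)) : PySem.Dict String (PySem.Set String) :=
  friend_pairs.foldl fsA_step PySem.Dict.empty

-- body of A's second loop for one person
def fsA_row (fm : PySem.Dict String (PySem.Set String)) (person : String) : List String :=
  let direct := fm.getD person PySem.Set.empty
  let sls := direct.foldl (fun s f => PySem.Set.update s (fm.getD f PySem.Set.empty)) PySem.Set.empty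
  PySem.List.sorted (PySem.Set.diff (PySem.Set.discard sls person) direct) (fun x => x) false

def find_second_level_friends (friend_pairs : List (String × String)) : List (String × List String) :=
  let fm := fsA_map friend_pairs
  (fm.keys.foldl (fun out person => out.insert person (fsA_row fm person)) PySem.Dict.empty).items

-- ===== PORT B =====
def fsB_edges (friend_pairs : List (String × String)) : List (String × String) :=
  friend_pairs.foldl (fun es ab => es ++ [(ab.1, ab.2), (ab.2, ab.1)]) []

-- {y for x, y in edges if x == p}
def fsB_nbrs (es : List (String × String)) (p : String) : PySem.Set String :=
  PySem.Set.ofList ((es.filter (fun e => e.1 == p)).map (fun e => e.2))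

-- body of B's result loop for one person
def fsB_row (es : List (String × String)) (p : String) : List String :=
  let np := fsB_nbrs es p
  let second := PySem.Set.ofList (np.flatMap (fun f => (es.filter (fun e => e.1 == f)).map (fun e => e.2)))
  PySem.List.sorted (PySem.Set.diff (PySem.Set.diff second np) (PySem.Set.ofList [p])) (fun x => x) false

def find_second_level_friends_alt (friend_pairs : List (String × String)) : List (String × List String) :=
  let es := fsB_edges friend_pairs
  let people := es.foldl (fun ps e => if e.1 ∈ ps then ps else ps ++ [e.1]) []
  (people.foldl (fun out p => out.insert p (fsB_row es p)) PySem.Dict.empty).items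

-- ===== PRECONDITION & SPEC =====
def Spec_find_second_level_friends (friend_pairs : List (String × String)) (out : List (String × List String)) : Prop := out = find_second_level_friends_alt friend_pairs
instance (friend_pairs : List (String × String)) (out : List (String × List String)) : Decidable (Spec_find_second_level_friends friend_pairs out) := by unfold Spec_find_second_level_friends; infer_instance

-- ===== CLAIM (what is proved, stated in full; the proofs are below) =====
def Claim_equal_find_second_level_friends : Prop := ∀ (friend_pairs : List (String × String)), Dom_find_second_level_friends friend_pairs → Spec_find_second_level_friends friend_pairs (find_second_level_friends friend_pairs)

-- ===== LEMMAS AND PROOFS =====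

-- the interleaved list of names, in A's key-insertion order
def fsNames (fp : List (String × String)) : List String := fp.flatMap (fun ab => [ab.1, ab.2])

theorem fs_keys_insert (d : PySem.Dict String (PySem.Set String)) (k : String) (v : PySem.Set String) :
    (d.insert k v).keys = PySem.Set.add d.keys k := by
  by_cases h : d.contains k = true
  · rw [PySem.Dict.keys_insert_of_contains _ _ h,
      PySem.Set.add_of_mem ((PySem.Dict.contains_iff_mem_keys _ _).mp h)]
  · rw [PySem.Dict.keys_insert_of_not_contains _ _ (by simpa using h),
      PySem.Set.add_of_not_mem]
    intro hm
    exact h ((PySem.Dict.contains_iff_mem_keys _ _).mpr hm)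

theorem fsA_keys_gen (fp : List (String × String)) (d : PySem.Dict String (PySem.Set String)) :
    (fp.foldl fsA_step d).keys = PySem.Set.update d.keys (fsNames fp) := by
  induction fp generalizing d with
  | nil => simp [fsNames, PySem.Set.update_nil]
  | cons ab t ih =>
    have hstep : (fsA_step d ab).keys = (PySem.Set.add d.keys ab.1).add ab.2 := by
      simp [fsA_step, fs_keys_insert]
    rw [List.foldl_cons, ih, hstep]
    show _ = PySem.Set.update d.keys ([ab.1, ab.2] ++ fsNames t)
    rw [PySem.Set.update_append, PySem.Set.update_cons, PySem.Set.update_cons, PySem.Set.update_nil]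

theorem fsA_keys (fp : List (String × String)) :
    (fsA_map fp).keys = PySem.Set.ofList (fsNames fp) := by
  rw [fsA_map, fsA_keys_gen, PySem.Dict.keys_empty, PySem.Set.update_nil_left]

theorem fsB_edges_eq (fp : List (String × String)) :
    fsB_edges fp = fp.flatMap (fun ab => [(ab.1, ab.2), (ab.2, ab.1)]) := by
  simpa [fsB_edges] using
    PySem.List.foldl_append_eq_flatMap (fun ab => [(ab.1, ab.2), (ab.2, ab.1)]) fp []

theorem fsB_people (fp : List (String × String)) :
    (fsB_edges fp).foldl (fun ps e => if e.1 ∈ ps then ps else ps ++ [e.1]) [] =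
      PySem.Set.ofList (fsNames fp) := by
  have h1 : ∀ es : List (String × String), es.foldl (fun ps e => if e.1 ∈ ps then ps else ps ++ [e.1]) [] = PySem.Set.ofList (es.map (fun e => e.1)) := by
    intro es
    rw [PySem.Set.ofList_eq_foldl, List.foldl_map]
    congr 1
    funext ps e
    rw [PySem.Set.add_eq_ite]
  rw [h1, fsB_edges_eq]
  congr 1
  simp [fsNames, List.map_flatMap]

theorem fsA_mem_getD_gen (fp : List (String × String)) (d : PySem.Dict String (PySem.Set String)) (p y : String) :
    y ∈ (fp.foldl fsA_step d).getD p PySem.Set.empty ↔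
      y ∈ d.getD p PySem.Set.empty ∨ ∃ ab ∈ fp, (p = ab.1 ∧ y = ab.2) ∨ (p = ab.2 ∧ y = ab.1) := by
  induction fp generalizing d with
  | nil => simp
  | cons ab t ih =>
    rw [List.foldl_cons, ih]
    have hstep : y ∈ (fsA_step d ab).getD p PySem.Set.empty ↔
        y ∈ d.getD p PySem.Set.empty ∨ (p = ab.1 ∧ y = ab.2) ∨ (p = ab.2 ∧ y = ab.1) := by
      simp only [fsA_step, PySem.Dict.getD_insert]
      by_cases h2 : p = ab.2 <;> by_cases h1 : p = ab.1 <;> by_cases hab : ab.1 = ab.2 <;>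
        simp [h1, h2, hab, PySem.Set.mem_union, PySem.Set.mem_ofList] <;>
        simp_all
    rw [hstep]
    simp only [List.mem_cons]
    aesop

theorem fsB_mem_nbrs (es : List (String × String)) (p y : String) :
    y ∈ fsB_nbrs es p ↔ (p, y) ∈ es := by
  simp only [fsB_nbrs, PySem.Set.mem_ofList, List.mem_map, List.mem_filter]
  constructor
  · rintro ⟨e, ⟨he, hq⟩, rfl⟩
    have : e.1 = p := by simpa using hq
    simpa [← this] using he
  · intro h
    exact ⟨(p, y), ⟨h, by simp⟩, rfl⟩

theorem fsA_mem_getD (fp : List (String × String)) (p y : String) :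
    y ∈ (fsA_map fp).getD p PySem.Set.empty ↔ (p, y) ∈ fsB_edges fp := by
  rw [fsA_map, fsA_mem_getD_gen, fsB_edges_eq]
  simp [List.mem_flatMap]

theorem fs_mem_foldl_update (g : String → PySem.Set String) (l : List String) (s : PySem.Set String) (y : String) :
    y ∈ l.foldl (fun s f => PySem.Set.update s (g f)) s ↔ y ∈ s ∨ ∃ f ∈ l, y ∈ g f := by
  induction l generalizing s with
  | nil => simp
  | cons a t ih =>
    rw [List.foldl_cons, ih]
    simp [PySem.Set.mem_update]
    tauto

theorem fs_nodup_foldl_update (g : String → PySem.Set String) (l : List String) (s : PySem.Set String)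
    (hs : s.Nodup) : (l.foldl (fun s f => PySem.Set.update s (g f)) s).Nodup := by
  induction l generalizing s with
  | nil => exact hs
  | cons a t ih => exact ih _ (PySem.Set.nodup_update _ _ hs)

theorem fs_row_eq (fp : List (String × String)) (p : String) :
    fsA_row (fsA_map fp) p = fsB_row (fsB_edges fp) p := by
  simp only [fsA_row, fsB_row]
  apply PySem.List.sorted_eq_sorted_of_perm _ _ _ (fun a b h => h)
  apply (List.perm_ext_iff_of_nodup ?_ ?_).mpr
  · intro y
    rw [PySem.Set.mem_diff, PySem.Set.mem_diff, PySem.Set.mem_diff, PySem.Set.mem_discard,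
      fs_mem_foldl_update, PySem.Set.mem_ofList]
    have hnb : ∀ z f, z ∈ (List.filter (fun e => e.1 == f) (fsB_edges fp)).map (fun e => e.2) ↔ (f, z) ∈ fsB_edges fp := by
      intro z f
      rw [← PySem.Set.mem_ofList]
      exact fsB_mem_nbrs _ _ _
    constructor
    · rintro ⟨⟨(h | ⟨f, hf, hy⟩), hne⟩, hnd⟩
      · simp at h
      · rw [fsA_mem_getD] at hf hy
        refine ⟨⟨?_, ?_⟩, ?_⟩
        · rw [List.mem_flatMap]
          exact ⟨f, (fsB_mem_nbrs _ _ _).mpr hf, (hnb _ _).mpr hy⟩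
        · rw [fsB_mem_nbrs]
          intro hc
          exact hnd ((fsA_mem_getD _ _ _).mpr hc)
        · simpa using hne
    · rintro ⟨⟨hy, hnp⟩, hnep⟩
      rw [List.mem_flatMap] at hy
      obtain ⟨f, hf, hy⟩ := hy
      rw [fsB_mem_nbrs] at hf hnp
      rw [hnb] at hy
      refine ⟨⟨Or.inr ⟨f, (fsA_mem_getD _ _ _).mpr hf, (fsA_mem_getD _ _ _).mpr hy⟩, by simpa using hnep⟩, ?_⟩
      intro hc
      exact hnp ((fsA_mem_getD _ _ _).mp hc)
  · exact PySem.Set.nodup_diff _ _ (PySem.Set.nodup_discard _ _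
      (fs_nodup_foldl_update _ _ _ List.nodup_nil))
  · exact PySem.Set.nodup_diff _ _ (PySem.Set.nodup_diff _ _ (PySem.Set.nodup_ofList _))

theorem fs_final (fp : List (String × String)) :
    find_second_level_friends fp = find_second_level_friends_alt fp := by
  rw [find_second_level_friends, find_second_level_friends_alt]
  have hk : (fsA_map fp).keys = PySem.Set.ofList (fsNames fp) := fsA_keys fp
  have hp := fsB_people fp
  have hnd : (PySem.Set.ofList (fsNames fp) : List String).Nodup := PySem.Set.nodup_ofList _
  rw [PySem.Dict.items_foldl_insert_fresh _ (fun a => a) (fun a => fsA_row (fsA_map fp) a) _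
      (fun a _ => PySem.Dict.contains_empty a) (by simpa [hk] using hnd),
    PySem.Dict.items_foldl_insert_fresh _ (fun a => a) (fun a => fsB_row (fsB_edges fp) a) _
      (fun a _ => PySem.Dict.contains_empty a) (by simpa [hp] using hnd),
    hk, hp]
  congr 1
  exact List.map_congr_left (fun p _ => by rw [fs_row_eq])

-- ===== VERDICT (by name: the statement is the Claim_ definition above) =====
theorem find_second_level_friends_spec : Claim_equal_find_second_level_friends := by
  intro fp _
  unfold Spec_find_second_level_friends
  exact fs_final fp
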